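-- pv_equiv track=rewrite | github.com/Doctor3131/PraktikumASA | Pertemuan2/PiramidaFiraunKhufra.py | rekursif
-- ===== SOURCE A (Python) =====
-- def rekursif(data):
--     if len(data) == 1:
--         return [data]
--
--     nextLayer = []
--     for i in range(len(data) - 1):
--         nextLayer.append(data[i] + data[i + 1])
--
--     hasil = rekursif(nextLayer)
--     hasil.append(data)
--     return hasil
-- ===== SOURCE B (Python) =====
-- def rekursif(data):
--     layers = []
--     cur = data
--     while len(cur) > 1:
--         layers.append(cur)
--         cur = [cur[i] + cur[i + 1] for i in range(len(cur) - 1)]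
--     layers.append(cur)
--     return layers[::-1]
-- ===== Notes on version B (the rewrite author's own statement) =====
-- stated objective: simpler
-- what changed: Replaces A's recursion (build next layer, recurse, append on the way back) by an iterative while-loop that collects the layers top-down and reverses once at the end; empty input, where A hits RecursionError, is excluded by Pre_.
import Mathlib
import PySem

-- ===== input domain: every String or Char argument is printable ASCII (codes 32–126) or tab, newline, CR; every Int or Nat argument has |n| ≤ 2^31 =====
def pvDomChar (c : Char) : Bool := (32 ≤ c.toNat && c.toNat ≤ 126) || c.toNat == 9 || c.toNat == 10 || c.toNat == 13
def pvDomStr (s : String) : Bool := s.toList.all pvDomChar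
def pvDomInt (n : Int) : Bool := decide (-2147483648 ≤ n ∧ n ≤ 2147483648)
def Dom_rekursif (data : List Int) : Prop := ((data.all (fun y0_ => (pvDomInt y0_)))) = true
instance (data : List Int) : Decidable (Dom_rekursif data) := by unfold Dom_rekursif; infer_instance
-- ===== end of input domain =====

-- B replaces A's recursion by an iterative layer-by-layer while loop (simpler decomposition);
-- return-value equivalence only, proved on nonempty inputs (A's recursion never returns on []).

-- ===== PORT A =====
-- fuel = data.length makes the recursion total; on the admitted inputs (data ≠ []) the
-- fuel-0 branch is never reached and each step is exactly A's code.
def rekursifFuel : Nat → List Int → List (List Int)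
  | 0, _ => []
  | Nat.succ n, data =>
    if data.length == 1 then [data]
    else
      let nextLayer := (PySem.List.pyRange 0 ((data.length : Int) - 1) 1).foldl
        (fun acc i => acc ++ [PySem.List.pyGetD data i 0 + PySem.List.pyGetD data (i + 1) 0]) []
      rekursifFuel n nextLayer ++ [data]

def rekursif (data : List Int) : List (List Int) := rekursifFuel data.length data

-- ===== PORT B =====
-- the comprehension [cur[i] + cur[i+1] for i in range(len(cur)-1)]
def nextSums (cur : List Int) : List Int :=
  (PySem.List.pyRange 0 ((cur.length : Int) - 1) 1).map
    (fun i => PySem.List.pyGetD cur i 0 + PySem.List.pyGetD cur (i + 1) 0)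

theorem length_nextSums (cur : List Int) : (nextSums cur).length = cur.length - 1 := by
  unfold nextSums
  rw [List.length_map, PySem.List.length_pyRange_one]
  omega

-- the while loop, carrying the accumulated layers
def altLoop (cur : List Int) (layers : List (List Int)) : List (List Int) :=
  if 1 < cur.length then altLoop (nextSums cur) (layers ++ [cur]) else layers ++ [cur]
termination_by cur.length
decreasing_by rw [length_nextSums]; omega

def rekursif_alt (data : List Int) : List (List Int) := (altLoop data []).reverse

-- ===== PRECONDITION & SPEC =====
-- Pre_ excludes only the empty list, on which A's recursion never terminates (RecursionError).
def Pre_rekursif (data : List Int) : Prop := data ≠ []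
instance (data : List Int) : Decidable (Pre_rekursif data) := by unfold Pre_rekursif; infer_instance
def pvWitness_rekursif : List Int := ([1, 2, 3])

def Spec_rekursif (data : List Int) (out : List (List Int)) : Prop := out = rekursif_alt data
instance (data : List Int) (out : List (List Int)) : Decidable (Spec_rekursif data out) := by unfold Spec_rekursif; infer_instance

-- ===== CLAIM (what is proved, stated in full; the proofs are below) =====
def Claim_equal_rekursif : Prop := ∀ (data : List Int), Dom_rekursif data → Pre_rekursif data → Spec_rekursif data (rekursif data)

-- ===== LEMMAS AND PROOFS =====

-- one-step unfolding of the (well-founded) loop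
theorem altLoop_eq (cur : List Int) (layers : List (List Int)) :
    altLoop cur layers =
      if 1 < cur.length then altLoop (nextSums cur) (layers ++ [cur]) else layers ++ [cur] := by
  rw [altLoop]

-- the loop's accumulator distributes over append
theorem altLoop_acc : ∀ (n : Nat) (cur : List Int), cur.length ≤ n →
    ∀ layers : List (List Int), altLoop cur layers = layers ++ altLoop cur [] := by
  intro n
  induction n with
  | zero =>
    intro cur h layers
    rw [altLoop_eq cur layers, altLoop_eq cur []]
    have : ¬ 1 < cur.length := by omega
    simp [this]
  | succ n ih =>
    intro cur h layers
    rw [altLoop_eq cur layers, altLoop_eq cur []]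
    by_cases h1 : 1 < cur.length
    · simp only [h1, if_pos]
      rw [ih (nextSums cur) (by rw [length_nextSums]; omega) (layers ++ [cur]),
          ih (nextSums cur) (by rw [length_nextSums]; omega) ([] ++ [cur])]
      simp
    · simp [h1]

-- A's hand-written adjacent-sum loop builds exactly B's comprehension
theorem foldl_eq_nextSums (data : List Int) :
    (PySem.List.pyRange 0 ((data.length : Int) - 1) 1).foldl
      (fun acc i => acc ++ [PySem.List.pyGetD data i 0 + PySem.List.pyGetD data (i + 1) 0]) []
    = nextSums data := by
  rw [PySem.List.foldl_append_singleton_eq_map]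
  simp [nextSums]

theorem fuel_eq_loop : ∀ (n : Nat) (cur : List Int), cur.length = n → cur ≠ [] →
    rekursifFuel n cur = (altLoop cur []).reverse := by
  intro n
  induction n with
  | zero =>
    intro cur hlen hne
    exact absurd (List.length_eq_zero_iff.mp hlen) hne
  | succ n ih =>
    intro cur hlen hne
    by_cases h1 : cur.length = 1
    · rw [rekursifFuel]
      have hb : (cur.length == 1) = true := by simp [h1]
      rw [if_pos hb, altLoop_eq cur []]
      have : ¬ 1 < cur.length := by omega
      simp [this]
    · rw [rekursifFuel]
      have hb : ¬ (cur.length == 1) = true := by simp [h1]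
      rw [if_neg hb]
      simp only [foldl_eq_nextSums]
      have hlt : 1 < cur.length := by
        have : cur.length ≠ 0 := by simpa using hne
        omega
      have hlen' : (nextSums cur).length = n := by rw [length_nextSums]; omega
      have hne' : nextSums cur ≠ [] := by
        intro h; rw [h] at hlen'; simp at hlen'; omega
      rw [ih (nextSums cur) hlen' hne']
      rw [altLoop_eq cur [], if_pos hlt,
          altLoop_acc (nextSums cur).length (nextSums cur) le_rfl ([] ++ [cur])]
      simp

-- ===== VERDICT (by name: the statement is the Claim_ definition above) =====
theorem rekursif_spec : Claim_equal_rekursif := by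
  intro data _ hpre
  unfold Spec_rekursif rekursif rekursif_alt
  rw [fuel_eq_loop data.length data rfl hpre]
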